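-- pv_equiv track=rewrite | github.com/KuanqXol/nlp | scripts/train_ner.py | sentence_to_bio
-- ===== SOURCE A (Python) =====
-- from typing import Dict, List, Optional, Sequence, Tuple
--
-- def sentence_to_bio(sentence: str, entities: List[Dict]) -> Tuple[List[str], List[str]]:
--     """Convert a sentence + entity annotations to (tokens, BIO_labels).
--
--     Note: this does character-level alignment then maps to whitespace tokens.
--     """
--     words = sentence.split()
--     labels = ["O"] * len(words)
--
--     # Build character → word index mapping
--     char_to_word = {}
--     pos = 0
--     for word_idx, word in enumerate(words):
--         start = sentence.find(word, pos)
--         if start < 0: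
--             start = pos
--         for ch_idx in range(start, start + len(word)):
--             char_to_word[ch_idx] = word_idx
--         pos = start + len(word)
--
--     for ent in entities:
--         ent_text = ent.get("text", "").strip()
--         ent_type = ent.get("type", "")
--         if not ent_text or ent_type not in ("PER", "LOC", "ORG"):
--             continue
--
--         # Find entity in sentence (case-sensitive first, then insensitive)
--         idx = sentence.find(ent_text)
--         if idx < 0:
--             idx = sentence.lower().find(ent_text.lower())
--         if idx < 0:
--             continue
--
--         # Map character span to word indices
--         ent_word_indices = sorted(
--             set(
--                 char_to_word.get(ch, -1)
--                 for ch in range(idx, idx + len(ent_text))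
--                 if ch in char_to_word
--             )
--         )
--         ent_word_indices = [i for i in ent_word_indices if i >= 0]
--
--         if not ent_word_indices:
--             continue
--
--         # Check for overlap with already-labeled words
--         if any(labels[wi] != "O" for wi in ent_word_indices):
--             continue
--
--         for rank, wi in enumerate(ent_word_indices):
--             if rank == 0:
--                 labels[wi] = f"B-{ent_type}"
--             else:
--                 labels[wi] = f"I-{ent_type}"
--
--     return words, labels
-- ===== SOURCE B (Python) =====
-- def sentence_to_bio(sentence, entities):
--     """Tokens + BIO labels: word char-intervals, counting to find the covered
--     contiguous word range, and slice-splicing the labels (no per-char dict)."""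
--     words = sentence.split()
--     labels = ["O"] * len(words)
--
--     # (start, end) char interval of each word, same forward-find convention as A.
--     intervals = []
--     pos = 0
--     for w in words:
--         f = sentence.find(w, pos)
--         start = pos if f < 0 else f
--         intervals.append((start, start + len(w)))
--         pos = start + len(w)
--
--     for ent in entities:
--         text = ent.get("text", "").strip()
--         if not text:
--             continue
--         etype = ent.get("type", "")
--         if etype not in ("PER", "LOC", "ORG"):
--             continue
--
--         idx = sentence.find(text)
--         if idx < 0:
--             idx = sentence.lower().find(text.lower())
--         if idx < 0:
--             continue
--         end = idx + len(text)
--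
--         # Word ends and starts are strictly increasing, so the words overlapping
--         # [idx, end) form the contiguous index range [lo, hi).
--         lo = sum(1 for (_, e) in intervals if e <= idx)
--         hi = sum(1 for (s, _) in intervals if s < end)
--         if hi <= lo:
--             continue
--         if any(l != "O" for l in labels[lo:hi]):
--             continue
--         labels = labels[:lo] + ["B-" + etype] + ["I-" + etype] * (hi - lo - 1) + labels[hi:]
--
--     return words, labels
-- ===== Notes on version B (the rewrite author's own statement) =====
-- stated objective: alternative
-- what changed: Replaces the per-character char->word dict and the set/sort/filter span mapping with per-word (start,end) char intervals: covered words are computed as a contiguous index range [lo,hi) by counting intervals ending before/starting inside the span, the overlap check reads the slice labels[lo:hi], and labels are updated by slice splicing instead of index-by-index assignment.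
import Mathlib
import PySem

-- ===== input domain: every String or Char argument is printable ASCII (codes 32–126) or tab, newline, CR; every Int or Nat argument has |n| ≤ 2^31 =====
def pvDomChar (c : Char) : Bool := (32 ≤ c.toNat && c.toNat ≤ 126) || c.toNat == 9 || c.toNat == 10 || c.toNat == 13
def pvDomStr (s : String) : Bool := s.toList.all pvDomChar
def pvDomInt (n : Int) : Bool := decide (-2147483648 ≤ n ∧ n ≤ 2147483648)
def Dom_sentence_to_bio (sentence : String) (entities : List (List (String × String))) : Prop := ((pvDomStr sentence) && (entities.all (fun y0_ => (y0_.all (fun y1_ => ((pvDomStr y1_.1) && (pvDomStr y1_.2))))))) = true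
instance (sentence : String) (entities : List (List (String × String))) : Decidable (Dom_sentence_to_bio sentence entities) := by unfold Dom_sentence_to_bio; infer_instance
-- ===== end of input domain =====

-- B replaces A's per-character char->word dict and its set/sort/filter span mapping by per-word
-- (start,end) char intervals: the covered words become the contiguous count range [lo,hi), the
-- overlap check a slice, the label update a slice splice (alternative algorithm, no per-char work).

-- ===== PORT A =====
-- A and B overwrite labels[wi] only at indices 0 <= wi < len(labels); pySetAt is exact there
-- (Python raises on other indices, which neither program reaches).
def pySetAt (xs : List String) (i : Int) (v : String) : List String :=
  if 0 ≤ i then xs.set i.toNat v else xs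

-- char -> word-index map build: for word_idx, word in enumerate(words): find, fallback, insert range
def bioStepA (sentence : String) (st : PySem.Dict Int Int × Int) (p : Int × String) :
    PySem.Dict Int Int × Int :=
  let f := PySem.Str.findFrom sentence p.2 st.2
  let start := if f < 0 then st.2 else f
  ((PySem.List.pyRange start (start + PySem.Str.len p.2)).foldl
      (fun d ch => d.insert ch p.1) st.1,
   start + PySem.Str.len p.2)

def bioEntStepA (sentence : String) (char_to_word : PySem.Dict Int Int)
    (labels : List String) (ent : List (String × String)) : List String :=
  let entD := PySem.Dict.ofList ent
  let ent_text := PySem.Str.strip (entD.getD "text" "")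
  let ent_type := entD.getD "type" ""
  if ent_text = "" ∨ ¬ (ent_type = "PER" ∨ ent_type = "LOC" ∨ ent_type = "ORG") then labels else
  let f := PySem.Str.find sentence ent_text
  let idx := if f < 0 then PySem.Str.find (PySem.Str.lower sentence) (PySem.Str.lower ent_text) else f
  if idx < 0 then labels else
  let ewi := (PySem.List.sorted
      (PySem.Set.ofList ((PySem.List.pyRange idx (idx + PySem.Str.len ent_text)).filterMap
        (fun ch => if char_to_word.contains ch then some (char_to_word.getD ch (-1)) else none)))
      id).filter (fun i => 0 ≤ i)
  if ewi = [] then labels else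
  if ewi.any (fun wi => PySem.List.pyGetD labels wi "" != "O") then labels else
  (PySem.List.enumerate ewi).foldl
    (fun labels p => pySetAt labels p.2 (if p.1 = 0 then "B-" ++ ent_type else "I-" ++ ent_type))
    labels

def sentence_to_bio (sentence : String) (entities : List (List (String × String))) :
    List String × List String :=
  let words := PySem.Str.split₀ sentence
  let char_to_word := ((PySem.List.enumerate words).foldl (bioStepA sentence) (PySem.Dict.empty, 0)).1
  (words, entities.foldl (bioEntStepA sentence char_to_word) (List.replicate words.length "O"))

-- ===== PORT B =====
-- per-word (start, end) char interval, same forward-find convention: the loop appends one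
-- interval per word, carrying pos; transliterated as the structural recursion over words.
def wordIntervals (sentence : String) : Int → List String → List (Int × Int)
  | _, [] => []
  | pos, w :: ws =>
    let f := PySem.Str.findFrom sentence w pos
    let start := if f < 0 then pos else f
    (start, start + PySem.Str.len w) :: wordIntervals sentence (start + PySem.Str.len w) ws

def bioEntStepB (sentence : String) (intervals : List (Int × Int))
    (labels : List String) (ent : List (String × String)) : List String :=
  let entD := PySem.Dict.ofList ent
  let text := PySem.Str.strip (entD.getD "text" "")
  if text = "" then labels else
  let etype := entD.getD "type" ""
  if ¬ (etype = "PER" ∨ etype = "LOC" ∨ etype = "ORG") then labels else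
  let f := PySem.Str.find sentence text
  let idx := if f < 0 then PySem.Str.find (PySem.Str.lower sentence) (PySem.Str.lower text) else f
  if idx < 0 then labels else
  let en := idx + PySem.Str.len text
  -- sum(1 for (_, e) in intervals if e <= idx)  — a 0/1 indicator sum, i.e. List.countP
  let lo : Nat := intervals.countP (fun p => decide (p.2 ≤ idx))
  let hi : Nat := intervals.countP (fun p => decide (p.1 < en))
  if hi ≤ lo then labels else
  if (PySem.List.slice labels (some (lo : Int)) (some (hi : Int))).any (fun l => l != "O") then labels else
  PySem.List.slice labels none (some (lo : Int)) ++ ["B-" ++ etype]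
    ++ List.replicate (hi - lo - 1) ("I-" ++ etype) ++ PySem.List.slice labels (some (hi : Int)) none

def sentence_to_bio_alt (sentence : String) (entities : List (List (String × String))) :
    List String × List String :=
  let words := PySem.Str.split₀ sentence
  let intervals := wordIntervals sentence 0 words
  (words, entities.foldl (bioEntStepB sentence intervals) (List.replicate words.length "O"))

-- ===== PRECONDITION & SPEC =====
def Spec_sentence_to_bio (sentence : String) (entities : List (List (String × String))) (out : List String × List String) : Prop := out = sentence_to_bio_alt sentence entities
instance (sentence : String) (entities : List (List (String × String))) (out : List String × List String) : Decidable (Spec_sentence_to_bio sentence entities out) := by unfold Spec_sentence_to_bio; infer_instance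

-- ===== CLAIM (what is proved, stated in full; the proofs are below) =====
def Claim_equal_sentence_to_bio : Prop := ∀ (sentence : String) (entities : List (List (String × String))), Dom_sentence_to_bio sentence entities → Spec_sentence_to_bio sentence entities (sentence_to_bio sentence entities)

-- ===== LEMMAS AND PROOFS =====

-- Lookup of a char in the interval list, later intervals taking precedence (like dict overwrite).
def ivGet (k : Int) (ivs : List (Int × Int)) (ch : Int) : Option Int :=
  match ivs with
  | [] => none
  | (s, e) :: r =>
    match ivGet (k + 1) r ch with
    | some j => some j
    | none => if s ≤ ch ∧ ch < e then some k else none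

-- The covered-word indices by interval overlap, as a recursion.
def covRec (idx en k : Int) : List (Int × Int) → List Int
  | [] => []
  | (s, e) :: r => (if s < en ∧ idx < e then [k] else []) ++ covRec idx en (k + 1) r

-- Intervals are chained: each starts at or after `pos`, is nonempty, and the next starts after it ends.
def chain (pos : Int) : List (Int × Int) → Prop
  | [] => True
  | (s, e) :: r => pos ≤ s ∧ s < e ∧ chain e r

lemma le_findFrom (s w : String) (pos : Int) (h0 : 0 ≤ pos)
    (h : ¬ PySem.Str.findFrom s w pos < 0) : pos ≤ PySem.Str.findFrom s w pos := by
  have hf := PySem.Chars.neg_one_le_find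
    (List.drop pos.toNat (List.take (Int.toNat ↑s.toList.length) s.toList)) w.toList
  simp only [PySem.Str.findFrom, PySem.Chars.findFrom] at h ⊢
  split_ifs at h ⊢ <;> omega

lemma len_pos_of_ne_empty (w : String) (h : w ≠ "") : 1 ≤ PySem.Str.len w := by
  have hx : w.toList ≠ [] := by intro hx; apply h; ext1; simpa using hx
  have : 0 < w.toList.length := List.length_pos_iff.mpr hx
  rw [PySem.Str.len_eq]; omega

lemma split₀go_ne_empty : ∀ (cs cur : List Char) (acc : List (List Char)),
    (∀ w ∈ acc, w ≠ []) → ∀ w ∈ PySem.Chars.split₀.go cs cur acc, w ≠ [] := by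
  intro cs
  induction cs with
  | nil =>
    intro cur acc hacc w hw
    simp only [PySem.Chars.split₀.go] at hw
    split at hw
    · exact hacc w (List.mem_reverse.mp hw)
    · rename_i hne
      rcases List.mem_cons.mp (List.mem_reverse.mp hw) with h1 | h2
      · subst h1
        simpa using by simpa [List.isEmpty_iff] using hne
      · exact hacc w h2
  | cons c rest ih =>
    intro cur acc hacc w hw
    simp only [PySem.Chars.split₀.go] at hw
    split at hw
    · split at hw
      · exact ih _ _ hacc w hw
      · rename_i hne
        refine ih _ _ ?_ w hw
        intro x hx
        rcases List.mem_cons.mp hx with h1 | h2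
        · subst h1
          simpa using by simpa [List.isEmpty_iff] using hne
        · exact hacc x h2
    · exact ih _ _ hacc w hw

lemma split₀_ne_empty (s : String) : ∀ w ∈ PySem.Str.split₀ s, w ≠ "" := by
  intro w hw
  have hmem : w.toList ∈ PySem.Chars.split₀ s.toList := by
    simp only [PySem.Str.split₀, List.mem_map] at hw
    obtain ⟨cs, hcs, rfl⟩ := hw
    simpa using hcs
  have hne : w.toList ≠ [] := split₀go_ne_empty _ _ _ (by simp) _ hmem
  intro h; subst h; simp at hne

lemma chain_wordIntervals (sentence : String) (ws : List String) : ∀ (pos : Int), 0 ≤ pos →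
    (∀ w ∈ ws, w ≠ "") → chain pos (wordIntervals sentence pos ws) := by
  induction ws with
  | nil => intro pos _ _; simp [wordIntervals, chain]
  | cons w ws ih =>
    intro pos h0 hw
    simp only [wordIntervals, chain]
    have hlen : 1 ≤ PySem.Str.len w := len_pos_of_ne_empty w (hw w (List.mem_cons_self))
    by_cases hf : PySem.Str.findFrom sentence w pos < 0
    · simp only [if_pos hf]
      exact ⟨le_refl _, by omega,
        ih _ (by omega) (fun x hx => hw x (List.mem_cons_of_mem _ hx))⟩
    · have := le_findFrom sentence w pos h0 hf
      simp only [if_neg hf]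
      exact ⟨this, by omega,
        ih _ (by omega) (fun x hx => hw x (List.mem_cons_of_mem _ hx))⟩

lemma length_wordIntervals (sentence : String) (ws : List String) : ∀ (pos : Int),
    (wordIntervals sentence pos ws).length = ws.length := by
  induction ws with
  | nil => intro pos; rfl
  | cons w ws ih => intro pos; simp [wordIntervals, ih]

lemma get?_insertRange (n : Nat) : ∀ (a : Int) (d : PySem.Dict Int Int) (v ch : Int),
    ((PySem.List.pyRange a (a + n)).foldl (fun d c => d.insert c v) d).get? ch
      = if a ≤ ch ∧ ch < a + n then some v else d.get? ch := by
  induction n with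
  | zero =>
    intro a d v ch
    rw [PySem.List.pyRange_one_eq_nil (by omega)]
    simp only [List.foldl_nil]
    rw [if_neg (by omega)]
  | succ n ih =>
    intro a d v ch
    rw [PySem.List.pyRange_one_cons (by omega), List.foldl_cons]
    have ha : a + ((n : Int) + 1) = (a + 1) + (n : Int) := by omega
    push_cast
    rw [ha, ih (a + 1) (d.insert a v) v ch]
    by_cases hch : ch = a
    · rw [if_neg (by omega), if_pos (by omega), hch]
      exact PySem.Dict.get?_insert_self d a v
    · rw [PySem.Dict.get?_insert_of_ne d v hch]
      by_cases h1 : a + 1 ≤ ch ∧ ch < a + 1 + (n:Int)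
      · rw [if_pos h1, if_pos (by omega)]
      · rw [if_neg h1, if_neg (by omega)]

lemma buildA_get? (sentence : String) (ws : List String) :
    ∀ (k pos : Int) (d : PySem.Dict Int Int) (ch : Int),
      ((PySem.List.enumerate ws k).foldl (bioStepA sentence) (d, pos)).1.get? ch
        = match ivGet k (wordIntervals sentence pos ws) ch with
          | some j => some j
          | none => d.get? ch := by
  induction ws with
  | nil => intro k pos d ch; simp [PySem.List.enumerate, wordIntervals, ivGet]
  | cons w ws ih =>
    intro k pos d ch
    rw [PySem.List.enumerate_cons, List.foldl_cons]
    simp only [bioStepA, wordIntervals]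
    rw [ih]
    simp only [PySem.Str.len_eq]
    set start := if PySem.Str.findFrom sentence w pos < 0 then pos
      else PySem.Str.findFrom sentence w pos with hstart
    have hins := get?_insertRange w.toList.length start d k ch
    cases hiv : ivGet (k + 1) (wordIntervals sentence (start + (w.toList.length : Int)) ws) ch with
    | some j => simp only [ivGet, hiv]
    | none =>
      simp only [ivGet, hiv, hins]
      split_ifs <;> rfl

lemma ivGet_ge : ∀ (ivs : List (Int × Int)) (k ch j : Int), ivGet k ivs ch = some j → k ≤ j := by
  intro ivs
  induction ivs with
  | nil => intro k ch j h; simp [ivGet] at h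
  | cons p r ih =>
    intro k ch j h
    obtain ⟨s, e⟩ := p
    simp only [ivGet] at h
    cases hiv : ivGet (k + 1) r ch with
    | some j' =>
      rw [hiv] at h
      have h2 : j' = j := by simpa using h
      have := ih (k + 1) ch j' hiv
      omega
    | none =>
      rw [hiv] at h
      split_ifs at h with hc
      have h2 : k = j := by simpa using h
      omega

lemma ivGet_none_of_lt : ∀ (ivs : List (Int × Int)) (pos k ch : Int),
    chain pos ivs → ch < pos → ivGet k ivs ch = none := by
  intro ivs
  induction ivs with
  | nil => intro pos k ch _ _; simp [ivGet]
  | cons p r ih =>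
    intro pos k ch hc hlt
    obtain ⟨s, e⟩ := p
    obtain ⟨h1, h2, h3⟩ := hc
    simp only [ivGet]
    rw [ih e (k + 1) ch h3 (by omega)]
    rw [if_neg (by omega)]

lemma ivGet_cons_chain (s e : Int) (r : List (Int × Int)) (pos k ch : Int)
    (hc : chain pos ((s, e) :: r)) :
    ivGet k ((s, e) :: r) ch = if s ≤ ch ∧ ch < e then some k else ivGet (k + 1) r ch := by
  obtain ⟨h1, h2, h3⟩ := hc
  simp only [ivGet]
  by_cases hin : s ≤ ch ∧ ch < e
  · rw [ivGet_none_of_lt r e (k + 1) ch h3 (by omega), if_pos hin]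
  · rw [if_neg hin]
    cases hiv : ivGet (k + 1) r ch <;> simp [hin]

lemma covRec_lb : ∀ (r : List (Int × Int)) (idx en k x : Int), x ∈ covRec idx en k r → k ≤ x := by
  intro r
  induction r with
  | nil => intro idx en k x h; simp [covRec] at h
  | cons p r ih =>
    intro idx en k x h
    obtain ⟨s, e⟩ := p
    simp only [covRec, List.mem_append] at h
    rcases h with h | h
    · split_ifs at h <;> simp at h; omega
    · have := ih idx en (k + 1) x h; omega

lemma covRec_pairwise : ∀ (r : List (Int × Int)) (idx en k : Int),
    List.Pairwise (· < ·) (covRec idx en k r) := by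
  intro r
  induction r with
  | nil => intro idx en k; simp [covRec]
  | cons p r ih =>
    intro idx en k
    obtain ⟨s, e⟩ := p
    simp only [covRec]
    split_ifs with hc
    · simp only [List.singleton_append, List.pairwise_cons]
      exact ⟨fun x hx => by have := covRec_lb r idx en (k + 1) x hx; omega, ih idx en (k + 1)⟩
    · simpa using ih idx en (k + 1)

lemma covRec_congr : ∀ (r : List (Int × Int)) (pos idx idx' en k : Int),
    chain pos r → idx ≤ idx' → idx' ≤ pos → covRec idx' en k r = covRec idx en k r := by
  intro r
  induction r with
  | nil => intro pos idx idx' en k _ _ _; rfl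
  | cons p r ih =>
    intro pos idx idx' en k hc h1 h2
    obtain ⟨s, e⟩ := p
    obtain ⟨hp1, hp2, hp3⟩ := hc
    simp only [covRec]
    rw [ih e idx idx' en (k + 1) hp3 h1 (by omega)]
    congr 1
    by_cases hs : s < en
    · rw [if_pos (by omega), if_pos (by omega)]
    · rw [if_neg (by omega), if_neg (by omega)]

lemma covRec_nil_of_ge : ∀ (r : List (Int × Int)) (pos idx en k : Int),
    chain pos r → en ≤ pos → covRec idx en k r = [] := by
  intro r
  induction r with
  | nil => intro pos idx en k _ _; rfl
  | cons p r ih =>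
    intro pos idx en k hc hle
    obtain ⟨s, e⟩ := p
    obtain ⟨hp1, hp2, hp3⟩ := hc
    simp only [covRec]
    rw [if_neg (by omega), ih e idx en (k + 1) hp3 (by omega)]
    rfl

lemma foldl_add_absorb : ∀ (l t : List Int) (s : PySem.Set Int) (k : Int), k ∈ s →
    List.foldl PySem.Set.add s (l.map (fun _ => k) ++ t) = List.foldl PySem.Set.add s t := by
  intro l
  induction l with
  | nil => intro t s k _; rfl
  | cons x l ih =>
    intro t s k hk
    simp only [List.map_cons, List.cons_append, List.foldl_cons]
    have : PySem.Set.add s k = s := by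
      simp only [PySem.Set.add]
      rw [if_pos]
      simpa using hk
    rw [this]
    exact ih t s k hk

lemma foldl_add_cons_out : ∀ (t : List Int) (s : List Int) (k : Int), (∀ x ∈ t, x ≠ k) →
    List.foldl PySem.Set.add (k :: s) t = k :: List.foldl PySem.Set.add s t := by
  intro t
  induction t with
  | nil => intro s k _; rfl
  | cons x t ih =>
    intro s k hne
    have hxk : x ≠ k := hne x List.mem_cons_self
    simp only [List.foldl_cons]
    have hadd : PySem.Set.add (k :: s) x = k :: PySem.Set.add s x := by
      simp only [PySem.Set.add, PySem.Set.contains, List.contains_cons]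
      have hbk : (x == k) = false := by simpa using hxk
      rw [hbk]
      simp only [Bool.false_or]
      split_ifs <;> simp
    rw [hadd]
    exact ih _ k (fun y hy => hne y (List.mem_cons_of_mem _ hy))

lemma ofList_filterMap_ivGet : ∀ (ivs : List (Int × Int)) (pos k idx en : Int),
    chain pos ivs → idx < en →
    PySem.Set.ofList ((PySem.List.pyRange idx en).filterMap (ivGet k ivs))
      = covRec idx en k ivs := by
  intro ivs
  induction ivs with
  | nil =>
    intro pos k idx en _ _
    have hnone : ∀ ch ∈ PySem.List.pyRange idx en, ivGet k [] ch = none := fun ch _ => rfl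
    rw [List.filterMap_eq_nil_iff.mpr hnone]
    rfl
  | cons p r ih =>
    intro pos k idx en hc hlt
    obtain ⟨s, e⟩ := p
    obtain ⟨h1, h2, h3⟩ := hc
    have hpt : ∀ ch, ivGet k ((s, e) :: r) ch
        = if s ≤ ch ∧ ch < e then some k else ivGet (k + 1) r ch :=
      fun ch => ivGet_cons_chain s e r pos k ch ⟨h1, h2, h3⟩
    by_cases hov : s < en ∧ idx < e
    · -- the word interval overlaps the entity span
      have hlo : idx ≤ max idx s := by omega
      have hsplit : PySem.List.pyRange idx en
          = PySem.List.pyRange idx (max idx s)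
            ++ PySem.List.pyRange (max idx s) (min en e)
            ++ PySem.List.pyRange (min en e) en := by
        rw [List.append_assoc,
            ← PySem.List.pyRange_one_append (max idx s) (min en e) en (by omega) (by omega),
            ← PySem.List.pyRange_one_append idx (max idx s) en (by omega) (by omega)]
      have hR1 : (PySem.List.pyRange idx (max idx s)).filterMap (ivGet k ((s, e) :: r)) = [] := by
        rw [List.filterMap_eq_nil_iff]
        intro ch hch
        have hb := PySem.List.mem_pyRange_one.mp hch
        rw [hpt ch, if_neg (by omega)]
        exact ivGet_none_of_lt r e (k + 1) ch h3 (by omega)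
      have hR2 : (PySem.List.pyRange (max idx s) (min en e)).filterMap (ivGet k ((s, e) :: r))
          = (PySem.List.pyRange (max idx s) (min en e)).map (fun _ => k) := by
        rw [List.filterMap_congr (g := fun _ => some k) (fun ch hch => by
          have hb := PySem.List.mem_pyRange_one.mp hch
          rw [hpt ch, if_pos (by omega)])]
        exact List.filterMap_eq_map_iff_forall_eq_some.mpr fun x => congrFun rfl
      have hR3 : (PySem.List.pyRange (min en e) en).filterMap (ivGet k ((s, e) :: r))
          = (PySem.List.pyRange (min en e) en).filterMap (ivGet (k + 1) r) :=
        List.filterMap_congr (fun ch hch => by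
          have hb := PySem.List.mem_pyRange_one.mp hch
          rw [hpt ch, if_neg (by omega)])
      rw [hsplit, List.filterMap_append, List.filterMap_append, hR1, hR2, hR3,
          List.nil_append]
      have hcons : PySem.List.pyRange (max idx s) (min en e)
          = max idx s :: PySem.List.pyRange (max idx s + 1) (min en e) :=
        PySem.List.pyRange_one_cons (by omega)
      set t := (PySem.List.pyRange (min en e) en).filterMap (ivGet (k + 1) r) with ht
      have hknot : ∀ x ∈ t, x ≠ k := by
        intro x hx
        rw [ht] at hx
        obtain ⟨ch, _, hch⟩ := List.mem_filterMap.mp hx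
        have := ivGet_ge r (k + 1) ch x hch
        omega
      have hset : PySem.Set.ofList ((PySem.List.pyRange (max idx s) (min en e)).map (fun _ => k) ++ t)
          = k :: PySem.Set.ofList t := by
        rw [hcons, List.map_cons, List.cons_append]
        show List.foldl PySem.Set.add (PySem.Set.add PySem.Set.empty k) _ = _
        have hek : PySem.Set.add PySem.Set.empty k = [k] := rfl
        rw [hek, foldl_add_absorb _ t [k] k (by simp)]
        rw [foldl_add_cons_out t [] k hknot]
        rfl
      rw [hset]
      simp only [covRec, if_pos hov, List.singleton_append]
      by_cases hee : e < en
      · have h5 : min en e = e := by omega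
        rw [ht, h5, ih e (k + 1) e en h3 hee,
            covRec_congr r e idx e en (k + 1) h3 (by omega) (by omega)]
      · have h5 : min en e = en := by omega
        rw [ht, h5, PySem.List.pyRange_one_eq_nil (by omega)]
        rw [covRec_nil_of_ge r e idx en (k + 1) h3 (by omega)]
        rfl
    · -- no overlap: the head interval contributes no char and no word index
      rcases not_and_or.mp hov with hno | hno
      · have hcong : ∀ ch ∈ PySem.List.pyRange idx en,
            ivGet k ((s, e) :: r) ch = ivGet (k + 1) r ch := by
          intro ch hch
          have hb := PySem.List.mem_pyRange_one.mp hch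
          rw [hpt ch, if_neg (by omega)]
        rw [List.filterMap_congr hcong, ih e (k + 1) idx en h3 hlt]
        simp only [covRec, if_neg hov, List.nil_append]
      · have hcong : ∀ ch ∈ PySem.List.pyRange idx en,
            ivGet k ((s, e) :: r) ch = ivGet (k + 1) r ch := by
          intro ch hch
          have hb := PySem.List.mem_pyRange_one.mp hch
          rw [hpt ch, if_neg (by omega)]
        rw [List.filterMap_congr hcong, ih e (k + 1) idx en h3 hlt]
        simp only [covRec, if_neg hov, List.nil_append]

-- A's sorted-set-of-mapped-chars expression equals covRec over B's intervals.
lemma entity_core (sentence : String) (idx L : Int) (hL : 1 ≤ L) :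
    (PySem.List.sorted
        (PySem.Set.ofList ((PySem.List.pyRange idx (idx + L)).filterMap
          (fun ch =>
            if (((PySem.List.enumerate (PySem.Str.split₀ sentence)).foldl
                (bioStepA sentence) (PySem.Dict.empty, 0)).1).contains ch
            then some ((((PySem.List.enumerate (PySem.Str.split₀ sentence)).foldl
                (bioStepA sentence) (PySem.Dict.empty, 0)).1).getD ch (-1)) else none)))
        id).filter (fun i => 0 ≤ i)
      = covRec idx (idx + L) 0 (wordIntervals sentence 0 (PySem.Str.split₀ sentence)) := by
  have hwords := split₀_ne_empty sentence
  have hchain := chain_wordIntervals sentence (PySem.Str.split₀ sentence) 0 (le_refl 0) hwords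
  have hd : ∀ ch, (((PySem.List.enumerate (PySem.Str.split₀ sentence)).foldl
      (bioStepA sentence) (PySem.Dict.empty, 0)).1).get? ch
      = ivGet 0 (wordIntervals sentence 0 (PySem.Str.split₀ sentence)) ch := by
    intro ch
    rw [buildA_get? sentence (PySem.Str.split₀ sentence) 0 0 PySem.Dict.empty ch]
    cases ivGet 0 (wordIntervals sentence 0 (PySem.Str.split₀ sentence)) ch <;> rfl
  have hfun : ∀ ch ∈ PySem.List.pyRange idx (idx + L),
      (if (((PySem.List.enumerate (PySem.Str.split₀ sentence)).foldl
            (bioStepA sentence) (PySem.Dict.empty, 0)).1).contains ch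
       then some ((((PySem.List.enumerate (PySem.Str.split₀ sentence)).foldl
            (bioStepA sentence) (PySem.Dict.empty, 0)).1).getD ch (-1)) else none)
        = ivGet 0 (wordIntervals sentence 0 (PySem.Str.split₀ sentence)) ch := by
    intro ch _
    simp only [PySem.Dict.getD, PySem.Dict.contains_eq_isSome_get?, hd ch]
    cases ivGet 0 (wordIntervals sentence 0 (PySem.Str.split₀ sentence)) ch <;> simp
  rw [List.filterMap_congr hfun,
      ofList_filterMap_ivGet (wordIntervals sentence 0 (PySem.Str.split₀ sentence)) 0 0 idx (idx + L)
        hchain (by omega),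
      PySem.List.sorted_eq_of_perm_of_pairwise_lt _ _ id (List.Perm.refl _)
        (covRec_pairwise (wordIntervals sentence 0 (PySem.Str.split₀ sentence)) idx (idx + L) 0),
      List.filter_eq_self.mpr]
  intro a ha
  simpa using covRec_lb (wordIntervals sentence 0 (PySem.Str.split₀ sentence)) idx (idx + L) 0 a ha

-- Counting facts on chained interval lists.
lemma countP_e_zero : ∀ (ivs : List (Int × Int)) (pos idx : Int), chain pos ivs → idx < pos →
    ivs.countP (fun p => decide (p.2 ≤ idx)) = 0 := by
  intro ivs
  induction ivs with
  | nil => intro pos idx _ _; rfl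
  | cons p r ih =>
    intro pos idx hc hlt
    obtain ⟨s, e⟩ := p
    obtain ⟨h1, h2, h3⟩ := hc
    rw [List.countP_cons, ih e idx h3 (by omega), if_neg (by simp; omega)]

lemma countP_s_zero : ∀ (ivs : List (Int × Int)) (pos en : Int), chain pos ivs → en ≤ pos →
    ivs.countP (fun p => decide (p.1 < en)) = 0 := by
  intro ivs
  induction ivs with
  | nil => intro pos en _ _; rfl
  | cons p r ih =>
    intro pos en hc hle
    obtain ⟨s, e⟩ := p
    obtain ⟨h1, h2, h3⟩ := hc
    rw [List.countP_cons, ih e en h3 (by omega), if_neg (by simp; omega)]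

-- The covered indices of chained intervals form the contiguous range [k+lo, k+hi).
lemma covRec_eq_range : ∀ (ivs : List (Int × Int)) (pos idx en k : Int),
    chain pos ivs → idx < en →
    covRec idx en k ivs
      = PySem.List.pyRange (k + (ivs.countP (fun p => decide (p.2 ≤ idx)) : Int))
          (k + (ivs.countP (fun p => decide (p.1 < en)) : Int)) := by
  intro ivs
  induction ivs with
  | nil =>
    intro pos idx en k _ _
    rw [PySem.List.pyRange_one_eq_nil (by simp)]
    rfl
  | cons p r ih =>
    intro pos idx en k hc hlt
    obtain ⟨s, e⟩ := p
    obtain ⟨h1, h2, h3⟩ := hc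
    simp only [covRec, List.countP_cons]
    by_cases he : e ≤ idx
    · -- word entirely before the span: not covered, both counts grow by one
      rw [if_neg (show ¬(s < en ∧ idx < e) by omega), List.nil_append,
          if_pos (show (decide (((s, e) : Int × Int).2 ≤ idx)) = true by simpa using he),
          if_pos (show (decide (((s, e) : Int × Int).1 < en)) = true by simp; omega),
          ih e idx en (k + 1) h3 hlt]
      have g1 : k + 1 + (List.countP (fun p => decide (p.2 ≤ idx)) r : Int)
          = k + ((List.countP (fun p => decide (p.2 ≤ idx)) r + 1 : Nat) : Int) := by
        push_cast; omega
      have g2 : k + 1 + (List.countP (fun p => decide (p.1 < en)) r : Int)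
          = k + ((List.countP (fun p => decide (p.1 < en)) r + 1 : Nat) : Int) := by
        push_cast; omega
      rw [g1, g2]
    · have hcr : r.countP (fun p => decide (p.2 ≤ idx)) = 0 :=
        countP_e_zero r e idx h3 (by omega)
      by_cases hs : s < en
      · -- overlapping word: covered, the start count grows
        rw [if_pos (show s < en ∧ idx < e by omega),
            if_neg (show ¬ (decide (((s, e) : Int × Int).2 ≤ idx)) = true by simpa using he),
            if_pos (show (decide (((s, e) : Int × Int).1 < en)) = true by simpa using hs),
            Nat.add_zero, ih e idx en (k + 1) h3 hlt, hcr]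
        rw [show k + ((0 : Nat) : Int) = k by push_cast; omega,
            show k + 1 + ((0 : Nat) : Int) = k + 1 by push_cast; omega,
            List.singleton_append]
        symm
        rw [PySem.List.pyRange_one_cons (by push_cast; omega),
            show k + ((List.countP (fun p => decide (p.1 < en)) r + 1 : Nat) : Int)
              = k + 1 + (List.countP (fun p => decide (p.1 < en)) r : Int) by push_cast; omega]
      · -- word entirely after the span: nothing covered anywhere
        have hsr : r.countP (fun p => decide (p.1 < en)) = 0 :=
          countP_s_zero r e en h3 (by omega)
        rw [if_neg (show ¬(s < en ∧ idx < e) by omega), List.nil_append,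
            if_neg (show ¬ (decide (((s, e) : Int × Int).2 ≤ idx)) = true by simpa using he),
            if_neg (show ¬ (decide (((s, e) : Int × Int).1 < en)) = true by simpa using hs),
            Nat.add_zero, Nat.add_zero, hcr, hsr,
            covRec_nil_of_ge r e idx en (k + 1) h3 (by omega),
            PySem.List.pyRange_one_eq_nil (by omega)]

-- The overlap test over the index range equals the test over the labels slice.
lemma any_range_eq_any_slice : ∀ (m lo : Nat) (labels : List String),
    lo + m ≤ labels.length →
    ((PySem.List.pyRange (lo : Int) ((lo : Int) + (m : Int))).any
        (fun wi => PySem.List.pyGetD labels wi "" != "O"))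
      = (((labels.drop lo).take m).any (fun l => l != "O")) := by
  intro m
  induction m with
  | zero =>
    intro lo labels _
    rw [PySem.List.pyRange_one_eq_nil (by omega)]
    simp
  | succ m ih =>
    intro lo labels hle
    have hlo : lo < labels.length := by omega
    rw [PySem.List.pyRange_one_cons (by omega)]
    have hdrop : labels.drop lo = labels[lo] :: labels.drop (lo + 1) :=
      List.drop_eq_getElem_cons hlo
    rw [hdrop]
    simp only [List.take_succ_cons, List.any_cons]
    congr 1
    · simp [PySem.List.pyGetD_natCast, List.getD_eq_getElem?_getD, hlo]
    · have := ih (lo + 1) labels (by omega)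
      rw [← this]
      congr 1
      push_cast
      rw [show ((lo : Int) + ((m : Int) + 1)) = (lo : Int) + 1 + (m : Int) by ring]

-- take (a+1) of a list set at a splits off the written cell.
lemma take_set_succ (L : List String) (a : Nat) (v : String) (ha : a < L.length) :
    (L.set a v).take (a + 1) = L.take a ++ [v] := by
  rw [List.set_eq_take_cons_drop v ha,
      show a + 1 = (L.take a).length + 1 by simp [List.length_take]; omega]
  simp [List.take_append]

-- Writing "I-" at each index of a range (ranks never 0) is a take/replicate/drop splice.
lemma foldl_set_range_tail : ∀ (m a : Nat) (L : List String) (k : Int) (b v : String),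
    1 ≤ k → a + m ≤ L.length →
    (PySem.List.enumerate (PySem.List.pyRange (a : Int) ((a : Int) + (m : Int))) k).foldl
        (fun L p => pySetAt L p.2 (if p.1 = 0 then b else v)) L
      = L.take a ++ List.replicate m v ++ L.drop (a + m) := by
  intro m
  induction m with
  | zero =>
    intro a L k b v _ _
    rw [PySem.List.pyRange_one_eq_nil (by omega)]
    simp
  | succ m ih =>
    intro a L k b v hk hle
    have ha : a < L.length := by omega
    rw [show (a : Int) + ((m + 1 : Nat) : Int) = ((a + 1 : Nat) : Int) + (m : Int) by
          push_cast; omega,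
        PySem.List.pyRange_one_cons (by push_cast; omega), PySem.List.enumerate_cons]
    simp only [List.foldl_cons]
    have hstep : pySetAt L (a : Int) (if k = 0 then b else v) = L.set a v := by
      rw [if_neg (by omega)]
      simp [pySetAt]
    rw [hstep, show ((a : Int) + 1) = ((a + 1 : Nat) : Int) by push_cast; omega,
        ih (a + 1) (L.set a v) (k + 1) b v (by omega) (by simp; omega)]
    rw [take_set_succ L a v ha, List.drop_set_of_lt (by omega),
        show a + 1 + m = a + (m + 1) by omega]
    simp [List.replicate_succ, List.append_assoc]

-- Writing B- at the first covered index and I- at the rest is a slice splice.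
lemma foldl_set_range (lo hi : Nat) (L : List String) (b v : String)
    (hlt : lo < hi) (hle : hi ≤ L.length) :
    (PySem.List.enumerate (PySem.List.pyRange (lo : Int) (hi : Int))).foldl
        (fun L p => pySetAt L p.2 (if p.1 = 0 then b else v)) L
      = L.take lo ++ [b] ++ List.replicate (hi - lo - 1) v ++ L.drop hi := by
  rw [PySem.List.pyRange_one_cons (by omega), PySem.List.enumerate_cons]
  simp only [List.foldl_cons]
  rw [if_pos trivial]
  have hstep : pySetAt L (lo : Int) b = L.set lo b := by
    simp [pySetAt]
  rw [hstep, show ((0 : Int) + 1) = 1 by norm_num,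
      show ((lo : Int) + 1) = ((lo + 1 : Nat) : Int) by push_cast; omega,
      show (hi : Int) = ((lo + 1 : Nat) : Int) + ((hi - lo - 1 : Nat) : Int) by push_cast; omega,
      foldl_set_range_tail (hi - lo - 1) (lo + 1) (L.set lo b) 1 b v le_rfl (by simp; omega)]
  rw [take_set_succ L lo b (by omega), show lo + 1 + (hi - lo - 1) = hi by omega,
      List.drop_set_of_lt (by omega)]

-- The per-entity step of A equals the per-entity step of B on labels of the right length.
set_option maxHeartbeats 1000000 in
lemma step_eq (sentence : String) (labels : List String) (ent : List (String × String))
    (hlen : labels.length = (PySem.Str.split₀ sentence).length) :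
    bioEntStepA sentence
        (((PySem.List.enumerate (PySem.Str.split₀ sentence)).foldl
            (bioStepA sentence) (PySem.Dict.empty, 0)).1) labels ent
      = bioEntStepB sentence (wordIntervals sentence 0 (PySem.Str.split₀ sentence)) labels ent := by
  simp only [bioEntStepA, bioEntStepB]
  by_cases h1 : PySem.Str.strip ((PySem.Dict.ofList ent).getD "text" "") = ""
  · rw [if_pos (Or.inl h1), if_pos h1]
  · rw [if_neg h1]
    by_cases h2 : (PySem.Dict.ofList ent).getD "type" "" = "PER"
        ∨ (PySem.Dict.ofList ent).getD "type" "" = "LOC"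
        ∨ (PySem.Dict.ofList ent).getD "type" "" = "ORG"
    · rw [if_neg (show ¬(PySem.Str.strip ((PySem.Dict.ofList ent).getD "text" "") = ""
            ∨ ¬((PySem.Dict.ofList ent).getD "type" "" = "PER"
                ∨ (PySem.Dict.ofList ent).getD "type" "" = "LOC"
                ∨ (PySem.Dict.ofList ent).getD "type" "" = "ORG"))
            from fun h => h.elim h1 (fun hnb => hnb h2)),
          if_neg (not_not_intro h2)]
      set text := PySem.Str.strip ((PySem.Dict.ofList ent).getD "text" "") with htext
      set etype := (PySem.Dict.ofList ent).getD "type" "" with het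
      set f := PySem.Str.find sentence text with hf
      set idx := (if f < 0 then PySem.Str.find (PySem.Str.lower sentence) (PySem.Str.lower text)
          else f) with hidx
      by_cases h3 : idx < 0
      · rw [if_pos h3, if_pos h3]
      · rw [if_neg h3, if_neg h3]
        have hL : 1 ≤ PySem.Str.len text := len_pos_of_ne_empty _ h1
        have hchain := chain_wordIntervals sentence (PySem.Str.split₀ sentence) 0 le_rfl
          (split₀_ne_empty sentence)
        rw [entity_core sentence idx (PySem.Str.len text) hL,
            covRec_eq_range (wordIntervals sentence 0 (PySem.Str.split₀ sentence)) 0 idx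
              (idx + PySem.Str.len text) 0 hchain (by omega)]
        set ivs := wordIntervals sentence 0 (PySem.Str.split₀ sentence) with hivs
        set lo := ivs.countP (fun p => decide (p.2 ≤ idx)) with hlo
        set hi := ivs.countP (fun p => decide (p.1 < idx + PySem.Str.len text)) with hhi
        rw [show (0 : Int) + (lo : Int) = (lo : Int) by ring,
            show (0 : Int) + (hi : Int) = (hi : Int) by ring]
        have hhile : hi ≤ labels.length := by
          rw [hlen, ← length_wordIntervals sentence (PySem.Str.split₀ sentence) 0, ← hivs]
          exact List.countP_le_length
        by_cases h4 : hi ≤ lo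
        · rw [if_pos (show PySem.List.pyRange (lo : Int) (hi : Int) = [] from
              PySem.List.pyRange_one_eq_nil (by omega)), if_pos h4]
        · rw [if_neg h4, if_neg (show ¬(PySem.List.pyRange (lo : Int) (hi : Int) = []) from by
              rw [PySem.List.pyRange_one_cons (by omega)]; simp)]
          have hany : ((PySem.List.pyRange (lo : Int) (hi : Int)).any
                (fun wi => PySem.List.pyGetD labels wi "" != "O"))
              = ((PySem.List.slice labels (some (lo : Int)) (some (hi : Int))).any
                (fun l => l != "O")) := by
            rw [PySem.List.slice_natCast]
            have h := any_range_eq_any_slice (hi - lo) lo labels (by omega)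
            rw [show ((lo : Int) + ((hi - lo : Nat) : Int)) = (hi : Int) by omega] at h
            exact h
          rw [hany]
          by_cases h5 : ((PySem.List.slice labels (some (lo : Int)) (some (hi : Int))).any
              (fun l => l != "O")) = true
          · rw [if_pos h5, if_pos h5]
          · rw [if_neg h5, if_neg h5,
                foldl_set_range lo hi labels ("B-" ++ etype) ("I-" ++ etype) (by omega) hhile,
                PySem.List.slice_to_natCast, PySem.List.slice_from_natCast]
    · rw [if_pos (Or.inr h2), if_pos h2]

-- A's per-entity step never changes the number of labels.
lemma foldl_pySetAt_len (g : Int × Int → String) : ∀ (l : List (Int × Int)) (L : List String),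
    (l.foldl (fun L p => pySetAt L p.2 (g p)) L).length = L.length := by
  intro l
  induction l with
  | nil => intro L; rfl
  | cons x l ih =>
    intro L
    rw [List.foldl_cons, ih]
    simp only [pySetAt]
    split_ifs <;> simp

set_option maxHeartbeats 1000000 in
lemma stepA_len (sentence : String) (d : PySem.Dict Int Int) (labels : List String)
    (ent : List (String × String)) :
    (bioEntStepA sentence d labels ent).length = labels.length := by
  simp only [bioEntStepA]
  split_ifs <;> first
    | exact foldl_pySetAt_len _ _ labels
    | rfl

-- Folding two pointwise-equal steps over the same list, under a preserved invariant.
lemma foldl_inv_congr {α β : Type} (P : β → Prop) (f g : β → α → β)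
    (hfg : ∀ s x, P s → f s x = g s x) (hP : ∀ s x, P s → P (f s x)) :
    ∀ (l : List α) (init : β), P init → l.foldl f init = l.foldl g init := by
  intro l
  induction l with
  | nil => intro init _; rfl
  | cons x l ih =>
    intro init h
    rw [List.foldl_cons, List.foldl_cons, ← hfg init x h, ih (f init x) (hP init x h)]

-- ===== VERDICT (by name: the statement is the Claim_ definition above) =====
theorem sentence_to_bio_spec : Claim_equal_sentence_to_bio := by
  intro sentence entities _
  show sentence_to_bio sentence entities = sentence_to_bio_alt sentence entities
  simp only [sentence_to_bio, sentence_to_bio_alt]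
  have h := foldl_inv_congr (fun L => L.length = (PySem.Str.split₀ sentence).length)
      (bioEntStepA sentence (((PySem.List.enumerate (PySem.Str.split₀ sentence)).foldl
          (bioStepA sentence) (PySem.Dict.empty, 0)).1))
      (bioEntStepB sentence (wordIntervals sentence 0 (PySem.Str.split₀ sentence)))
      (fun L ent hP => step_eq sentence L ent hP)
      (fun L ent hP => by dsimp only; rw [stepA_len]; exact hP)
      entities (List.replicate (PySem.Str.split₀ sentence).length "O") (by simp)
  exact congrArg _ h
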